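-- pv_equiv track=rewrite | github.com/ankushjindal/hotel-reviews-reviewed | src/hotels/sentiment.py | getNumFeatures
-- ===== SOURCE A (Python) =====
-- def getNumFeatures(s):
--
-- 	#Array value
-- 	#1
-- 	locArr = ["location","position","place","property","situation","site","locality","locale","spot","whereabouts","whereabout","scene","setting","area","environment","venue","address","view","sight","beach"]
--
-- 	#2
-- 	roomArr = ["rooms","beds","matress","bed","blanket","furniture","window","room","toilet","washroom","sofa","windows","bath","door","air-conditioning","ac"]
--
-- 	#3
-- 	foodArr = ["breakfast","food","dinner","lunch","restaurant","drinks","buffet"]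
--
-- 	#4
-- 	serviceArr = ["room service","service","reception","staff","receptionist","room-service"]
--
-- 	#5
-- 	cleanArr = ["clean","cleanliness","fresh","freshness","sanitation","neat","neatness","dirt","dirty","dust","dusty","cleaning"]
--
-- 	# general array -> is not evaluated, just for classification
-- 	#6
-- 	generalArr = ["hotel","hotels","resort","resorts","house","guesthouse","inn","motel"]
--
-- 	featuresArray =[]
-- 	sar = s.split('.')
-- 	for review in sar:
-- 		if review:
-- 			if(any(x in review for x in locArr)):
-- 				featuresArray.append(1)
-- 	for review in sar:
-- 		if review:
-- 			if(any(x in review for x in roomArr)):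
-- 				featuresArray.append(2)
-- 	for review in sar:
-- 		if review:
-- 			if(any(x in review for x in foodArr)):
-- 				featuresArray.append(3)
-- 	for review in sar:
-- 		if review:
-- 			if(any(x in review for x in serviceArr)):
-- 				featuresArray.append(4)
-- 	for review in sar:
-- 		if review:
-- 			if(any(x in review for x in cleanArr)):
-- 				featuresArray.append(5)
-- 	for review in sar:
-- 		if review:
-- 			if(any(x in review for x in generalArr)):
-- 				featuresArray.append(6)
-- 	return featuresArray
-- ===== SOURCE B (Python) =====
-- def getNumFeatures(s):
-- 	#1
-- 	locArr = ["location","position","place","property","situation","site","locality","locale","spot","whereabouts","whereabout","scene","setting","area","environment","venue","address","view","sight","beach"]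
-- 	#2
-- 	roomArr = ["rooms","beds","matress","bed","blanket","furniture","window","room","toilet","washroom","sofa","windows","bath","door","air-conditioning","ac"]
-- 	#3
-- 	foodArr = ["breakfast","food","dinner","lunch","restaurant","drinks","buffet"]
-- 	#4
-- 	serviceArr = ["room service","service","reception","staff","receptionist","room-service"]
-- 	#5
-- 	cleanArr = ["clean","cleanliness","fresh","freshness","sanitation","neat","neatness","dirt","dirty","dust","dusty","cleaning"]
-- 	#6
-- 	generalArr = ["hotel","hotels","resort","resorts","house","guesthouse","inn","motel"]
--
-- 	# one pass: count, per category, the nonempty sentences containing a keyword,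
-- 	# then emit each category number that many times, in category order
-- 	c1 = c2 = c3 = c4 = c5 = c6 = 0
-- 	for review in s.split('.'):
-- 		if review:
-- 			if any(x in review for x in locArr):
-- 				c1 += 1
-- 			if any(x in review for x in roomArr):
-- 				c2 += 1
-- 			if any(x in review for x in foodArr):
-- 				c3 += 1
-- 			if any(x in review for x in serviceArr):
-- 				c4 += 1
-- 			if any(x in review for x in cleanArr):
-- 				c5 += 1
-- 			if any(x in review for x in generalArr):
-- 				c6 += 1
-- 	return [1]*c1 + [2]*c2 + [3]*c3 + [4]*c4 + [5]*c5 + [6]*c6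
-- ===== Notes on version B (the rewrite author's own statement) =====
-- stated objective: alternative
-- what changed: Replaces six separate scans over the split sentences (one per category, each appending its number) with a single pass that keeps six per-category counters, emitting each category number count-many times at the end; output order (all 1s, then 2s, ...) is preserved because each of A's passes only ever appends copies of one constant.
import Mathlib
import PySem

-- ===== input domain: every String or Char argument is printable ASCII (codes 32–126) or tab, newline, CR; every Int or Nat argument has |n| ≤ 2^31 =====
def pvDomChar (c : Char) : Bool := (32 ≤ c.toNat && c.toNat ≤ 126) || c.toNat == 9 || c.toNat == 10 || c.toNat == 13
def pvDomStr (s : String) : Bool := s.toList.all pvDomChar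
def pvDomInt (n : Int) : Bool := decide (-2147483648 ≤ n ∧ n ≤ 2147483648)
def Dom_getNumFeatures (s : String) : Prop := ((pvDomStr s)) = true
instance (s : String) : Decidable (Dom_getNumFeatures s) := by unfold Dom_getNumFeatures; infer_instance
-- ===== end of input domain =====

-- B makes ONE pass over the split sentences keeping six per-category counters instead of
-- A's six separate scans, then emits each category number count-many times (alternative decomposition).

-- keyword arrays (same literals in both Pythons)
def pvLocArr : List String := ["location","position","place","property","situation","site","locality","locale","spot","whereabouts","whereabout","scene","setting","area","environment","venue","address","view","sight","beach"]
def pvRoomArr : List String := ["rooms","beds","matress","bed","blanket","furniture","window","room","toilet","washroom","sofa","windows","bath","door","air-conditioning","ac"]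
def pvFoodArr : List String := ["breakfast","food","dinner","lunch","restaurant","drinks","buffet"]
def pvServiceArr : List String := ["room service","service","reception","staff","receptionist","room-service"]
def pvCleanArr : List String := ["clean","cleanliness","fresh","freshness","sanitation","neat","neatness","dirt","dirty","dust","dusty","cleaning"]
def pvGeneralArr : List String := ["hotel","hotels","resort","resorts","house","guesthouse","inn","motel"]

-- ===== PORT A =====
def getNumFeatures (s : String) : List Int :=
  let sar := PySem.Chars.splitOn s.toList ['.']
  let f0 : List Int := []
  let f1 := sar.foldl (fun acc review => if review ≠ [] then (if pvLocArr.any (fun x => PySem.Chars.isIn x.toList review) then acc ++ [1] else acc) else acc) f0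
  let f2 := sar.foldl (fun acc review => if review ≠ [] then (if pvRoomArr.any (fun x => PySem.Chars.isIn x.toList review) then acc ++ [2] else acc) else acc) f1
  let f3 := sar.foldl (fun acc review => if review ≠ [] then (if pvFoodArr.any (fun x => PySem.Chars.isIn x.toList review) then acc ++ [3] else acc) else acc) f2
  let f4 := sar.foldl (fun acc review => if review ≠ [] then (if pvServiceArr.any (fun x => PySem.Chars.isIn x.toList review) then acc ++ [4] else acc) else acc) f3
  let f5 := sar.foldl (fun acc review => if review ≠ [] then (if pvCleanArr.any (fun x => PySem.Chars.isIn x.toList review) then acc ++ [5] else acc) else acc) f4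
  let f6 := sar.foldl (fun acc review => if review ≠ [] then (if pvGeneralArr.any (fun x => PySem.Chars.isIn x.toList review) then acc ++ [6] else acc) else acc) f5
  f6

-- ===== PORT B =====
def getNumFeatures_alt (s : String) : List Int :=
  let c := (PySem.Chars.splitOn s.toList ['.']).foldl
    (fun (c : Nat × Nat × Nat × Nat × Nat × Nat) review =>
      if review ≠ [] then
        (c.1 + (if pvLocArr.any (fun x => PySem.Chars.isIn x.toList review) then 1 else 0),
         c.2.1 + (if pvRoomArr.any (fun x => PySem.Chars.isIn x.toList review) then 1 else 0),
         c.2.2.1 + (if pvFoodArr.any (fun x => PySem.Chars.isIn x.toList review) then 1 else 0),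
         c.2.2.2.1 + (if pvServiceArr.any (fun x => PySem.Chars.isIn x.toList review) then 1 else 0),
         c.2.2.2.2.1 + (if pvCleanArr.any (fun x => PySem.Chars.isIn x.toList review) then 1 else 0),
         c.2.2.2.2.2 + (if pvGeneralArr.any (fun x => PySem.Chars.isIn x.toList review) then 1 else 0))
      else c)
    (0, 0, 0, 0, 0, 0)
  List.replicate c.1 (1 : Int) ++ List.replicate c.2.1 2 ++ List.replicate c.2.2.1 3 ++
    List.replicate c.2.2.2.1 4 ++ List.replicate c.2.2.2.2.1 5 ++ List.replicate c.2.2.2.2.2 6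

-- ===== PRECONDITION & SPEC =====
def Spec_getNumFeatures (s : String) (out : List Int) : Prop := out = getNumFeatures_alt s
instance (s : String) (out : List Int) : Decidable (Spec_getNumFeatures s out) := by unfold Spec_getNumFeatures; infer_instance

-- ===== CLAIM (what is proved, stated in full; the proofs are below) =====
def Claim_equal_getNumFeatures : Prop := ∀ (s : String), Dom_getNumFeatures s → Spec_getNumFeatures s (getNumFeatures s)

-- ===== LEMMAS AND PROOFS =====

-- the per-sentence test shared by both programs, as a Bool predicate
def pvQ (arr : List String) (r : List Char) : Bool :=
  decide (r ≠ []) && arr.any (fun x => PySem.Chars.isIn x.toList r)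

-- each of A's passes appends just copies of one constant: it is countP-many replicas
theorem pvPassA (arr : List String) (k : Int) (l : List (List Char)) (acc : List Int) :
    l.foldl (fun acc review => if review ≠ [] then (if arr.any (fun x => PySem.Chars.isIn x.toList review) then acc ++ [k] else acc) else acc) acc
      = acc ++ List.replicate (l.countP (pvQ arr)) k := by
  induction l generalizing acc with
  | nil => simp
  | cons r t ih =>
      by_cases h1 : r = []
      · simp only [List.foldl_cons, List.countP_cons, pvQ, h1, ne_eq, not_true_eq_false,
          if_false, decide_false, Bool.false_and]
        simpa using ih acc
      · by_cases h2 : arr.any (fun x => PySem.Chars.isIn x.toList r) = true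
        · have hc : List.countP (pvQ arr) (r :: t) = List.countP (pvQ arr) t + 1 := by
            simp [pvQ, h1, h2]
          simp only [List.foldl_cons, if_pos h1, if_pos h2, ih, hc]
          simp [List.replicate_succ, List.append_assoc]
        · have hc : List.countP (pvQ arr) (r :: t) = List.countP (pvQ arr) t := by
            simp [pvQ, h1, h2]
          simp only [List.foldl_cons, if_pos h1, if_neg h2, ih, hc]

-- B's single pass computes exactly the six countP values
theorem pvPassB (l : List (List Char)) (c1 c2 c3 c4 c5 c6 : Nat) :
    l.foldl
      (fun (c : Nat × Nat × Nat × Nat × Nat × Nat) review =>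
        if review ≠ [] then
          (c.1 + (if pvLocArr.any (fun x => PySem.Chars.isIn x.toList review) then 1 else 0),
           c.2.1 + (if pvRoomArr.any (fun x => PySem.Chars.isIn x.toList review) then 1 else 0),
           c.2.2.1 + (if pvFoodArr.any (fun x => PySem.Chars.isIn x.toList review) then 1 else 0),
           c.2.2.2.1 + (if pvServiceArr.any (fun x => PySem.Chars.isIn x.toList review) then 1 else 0),
           c.2.2.2.2.1 + (if pvCleanArr.any (fun x => PySem.Chars.isIn x.toList review) then 1 else 0),
           c.2.2.2.2.2 + (if pvGeneralArr.any (fun x => PySem.Chars.isIn x.toList review) then 1 else 0))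
        else c)
      (c1, c2, c3, c4, c5, c6)
      = (c1 + l.countP (pvQ pvLocArr), c2 + l.countP (pvQ pvRoomArr),
         c3 + l.countP (pvQ pvFoodArr), c4 + l.countP (pvQ pvServiceArr),
         c5 + l.countP (pvQ pvCleanArr), c6 + l.countP (pvQ pvGeneralArr)) := by
  induction l generalizing c1 c2 c3 c4 c5 c6 with
  | nil => simp
  | cons r t ih =>
      by_cases h1 : r = []
      · simp only [List.foldl_cons, h1, ne_eq, not_true_eq_false, if_false]
        rw [ih]
        simp [pvQ]
      · have hq : ∀ arr : List String,
            pvQ arr r = arr.any (fun x => PySem.Chars.isIn x.toList r) := by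
          intro arr; simp [pvQ, h1]
        simp only [List.foldl_cons, if_pos h1, ih, List.countP_cons, hq, Prod.mk.injEq]
        refine ⟨?_, ?_, ?_, ?_, ?_, ?_⟩ <;> split_ifs <;> omega

-- ===== VERDICT (by name: the statement is the Claim_ definition above) =====
theorem getNumFeatures_spec : Claim_equal_getNumFeatures := by
  intro s _
  simp only [Spec_getNumFeatures, getNumFeatures, getNumFeatures_alt]
  rw [pvPassA, pvPassA, pvPassA, pvPassA, pvPassA, pvPassA, pvPassB]
  simp [List.append_assoc]
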